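-- pv_equiv track=rewrite | github.com/tsoni/Natural-Language-Processing | Main.py | FixSingleAspect
-- ===== SOURCE A (Python) =====
-- def FixSingleAspect(polarities):
--     result=[]
--     ValueLocation = 0
--     ValueService = 0
--     ValueRooms = 0
--     ValuePrice = 0
--     # For every pair item in the list of aspects detected in a review from the function SingleAspect
--     for i in polarities:
--         #For the key of every pair if it corresponds to one of the aspects add their values
--         for key in i:
--             if 'location' in i:
--                 ValueLocation=ValueLocation+i[key]
--             elif 'rooms' in i:
--                 ValueRooms=ValueRooms+i[key]
--             elif 'service' in i:
--                 ValueService=ValueService+i[key]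
--             elif 'value' in i:
--                 ValuePrice=ValuePrice+i[key]
--     # Return a final list with all four aspects and their corresponding sentiment for this review
--     result.append({'location': ValueLocation})
--     result.append({'rooms': ValueRooms})
--     result.append({'service' : ValueService})
--     result.append({'value': ValuePrice})
--     return result
-- ===== SOURCE B (Python) =====
-- def FixSingleAspect(polarities):
--     aspects = ['location', 'rooms', 'service', 'value']
--
--     def tag(d):
--         for j, k in enumerate(aspects):
--             if k in d:
--                 return j
--         return -1
--
--     return [{k: sum(v for d in polarities if tag(d) == j for v in d.values())}
--             for j, k in enumerate(aspects)]
-- ===== Notes on version B (the rewrite author's own statement) =====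
-- stated objective: alternative
-- what changed: B replaces A's four-accumulator fold with nested inner key loop by a classify-then-aggregate scheme: a tag() helper assigns each dict the index of its first matching aspect, and each of the four output entries is built by its own filtered-sum comprehension over the tagged dicts.
import Mathlib
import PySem

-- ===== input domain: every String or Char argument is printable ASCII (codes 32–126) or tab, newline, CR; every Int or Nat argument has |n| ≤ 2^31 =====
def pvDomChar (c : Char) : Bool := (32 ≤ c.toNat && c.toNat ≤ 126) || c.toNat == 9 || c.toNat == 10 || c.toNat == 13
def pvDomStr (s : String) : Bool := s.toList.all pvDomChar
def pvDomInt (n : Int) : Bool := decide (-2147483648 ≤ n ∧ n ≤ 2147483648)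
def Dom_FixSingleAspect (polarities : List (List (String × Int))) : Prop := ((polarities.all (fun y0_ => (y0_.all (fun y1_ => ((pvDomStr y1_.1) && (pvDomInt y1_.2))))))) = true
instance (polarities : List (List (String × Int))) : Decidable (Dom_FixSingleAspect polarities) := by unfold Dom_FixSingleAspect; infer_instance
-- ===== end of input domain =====

-- B builds each of the four output entries by its own filtered pass (classify every
-- dict once with a priority tag, then sum per aspect), instead of A's accumulator
-- fold with a nested inner key loop.

-- ===== PORT A =====
-- inner loop of A: 'for key in i: if "location" in i: … i[key] …' (dict = assoc list;
-- 'key in i' tests the keys, 'i[key]' is first-match lookup — key is always present, getD 0 unreachable)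
def pvStepA (i : List (String × Int)) (a : Int × Int × Int × Int) : Int × Int × Int × Int :=
  i.foldl (fun a kv =>
    if (i.map Prod.fst).contains "location" then
      (a.1 + ((i.lookup kv.1).getD 0), a.2.1, a.2.2.1, a.2.2.2)
    else if (i.map Prod.fst).contains "rooms" then
      (a.1, a.2.1 + ((i.lookup kv.1).getD 0), a.2.2.1, a.2.2.2)
    else if (i.map Prod.fst).contains "service" then
      (a.1, a.2.1, a.2.2.1 + ((i.lookup kv.1).getD 0), a.2.2.2)
    else if (i.map Prod.fst).contains "value" then
      (a.1, a.2.1, a.2.2.1, a.2.2.2 + ((i.lookup kv.1).getD 0))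
    else a) a

def FixSingleAspect (polarities : List (List (String × Int))) : List (List (String × Int)) :=
  let st := polarities.foldl (fun a i => pvStepA i a) ((0, 0, 0, 0) : Int × Int × Int × Int)
  [[("location", st.1)], [("rooms", st.2.1)], [("service", st.2.2.1)], [("value", st.2.2.2)]]

-- ===== PORT B =====
-- Source B's tag(d): first index j with aspects[j] in d, else -1
def pvTag (i : List (String × Int)) : Int :=
  match (["location", "rooms", "service", "value"].findIdx?
          (fun k => (i.map Prod.fst).contains k)) with
  | some j => (j : Int)
  | none => -1

-- outer list comprehension over enumerate(aspects); the inner generator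
-- 'sum(v for d in polarities if tag(d)==j for v in d.values())' is the filtered flat sum
def FixSingleAspect_alt (polarities : List (List (String × Int))) : List (List (String × Int)) :=
  (["location", "rooms", "service", "value"] : List String).zipIdx.map (fun kj =>
    [(kj.1, ((polarities.filter (fun d => pvTag d == ((kj.2 : Int)))).flatMap
               (fun d => d.map Prod.snd)).sum)])

-- ===== PRECONDITION & SPEC =====
-- Pre_ excludes association lists whose inner lists repeat a key: a Python dict cannot
-- contain duplicate keys, so such inputs represent no dict A could be called on.
def Pre_FixSingleAspect (polarities : List (List (String × Int))) : Prop :=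
  ∀ i ∈ polarities, (i.map Prod.fst).Nodup

instance (polarities : List (List (String × Int))) : Decidable (Pre_FixSingleAspect polarities) := by
  unfold Pre_FixSingleAspect; infer_instance

def pvWitness_FixSingleAspect : (List (List (String × Int))) :=
  [[("location", 2), ("great", 1)], [("rooms", 3)], [], [("x", -5)]]

def Spec_FixSingleAspect (polarities : List (List (String × Int))) (out : List (List (String × Int))) : Prop := out = FixSingleAspect_alt polarities
instance (polarities : List (List (String × Int))) (out : List (List (String × Int))) : Decidable (Spec_FixSingleAspect polarities out) := by unfold Spec_FixSingleAspect; infer_instance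

-- ===== CLAIM (what is proved, stated in full; the proofs are below) =====
def Claim_equal_FixSingleAspect : Prop := ∀ (polarities : List (List (String × Int))), Dom_FixSingleAspect polarities → Pre_FixSingleAspect polarities → Spec_FixSingleAspect polarities (FixSingleAspect polarities)

-- ===== LEMMAS AND PROOFS =====

-- per-aspect total of B: sum of all values of the dicts tagged j
def pvAspSum (j : Int) (pol : List (List (String × Int))) : Int :=
  ((pol.filter (fun d => pvTag d == j)).flatMap (fun d => d.map Prod.snd)).sum

-- pvTag as the explicit priority chain
theorem pvTag_eq (i : List (String × Int)) :
    pvTag i =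
      (if (i.map Prod.fst).contains "location" then 0
       else if (i.map Prod.fst).contains "rooms" then 1
       else if (i.map Prod.fst).contains "service" then 2
       else if (i.map Prod.fst).contains "value" then 3
       else -1) := by
  unfold pvTag
  by_cases h1 : (i.map Prod.fst).contains "location" <;>
    by_cases h2 : (i.map Prod.fst).contains "rooms" <;>
      by_cases h3 : (i.map Prod.fst).contains "service" <;>
        by_cases h4 : (i.map Prod.fst).contains "value" <;>
          simp [List.findIdx?, List.findIdx?.go, List.contains_eq_mem] at h1 h2 h3 h4 ⊢ <;>
          simp [h1, h2, h3, h4]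

-- first-match lookup of a member's key returns its value when the keys are distinct
theorem pv_lookup_of_nodup {i : List (String × Int)} (h : (i.map Prod.fst).Nodup)
    {kv : String × Int} (hm : kv ∈ i) : i.lookup kv.1 = some kv.2 := by
  induction i with
  | nil => cases hm
  | cons hd tl ih =>
    simp only [List.map_cons, List.nodup_cons] at h
    rcases List.mem_cons.mp hm with he | hm
    · subst he; simp [List.lookup]
    · have hne : hd.1 ≠ kv.1 := by
        intro he; exact h.1 (he ▸ (List.mem_map.mpr ⟨kv, hm, rfl⟩))
      have hb : (kv.1 == hd.1) = false := beq_eq_false_iff_ne.mpr (Ne.symm hne)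
      simp [List.lookup, hb, ih h.2 hm]

-- summing the lookups over the keys = summing the stored values (distinct keys)
theorem pv_sum_lookup {i : List (String × Int)} (h : (i.map Prod.fst).Nodup) :
    (i.map (fun kv => (i.lookup kv.1).getD 0)).sum = (i.map Prod.snd).sum := by
  have : i.map (fun kv => (i.lookup kv.1).getD 0) = i.map Prod.snd :=
    List.map_congr_left (fun kv hm => by rw [pv_lookup_of_nodup h hm]; rfl)
  rw [this]

-- folding an addition into one fixed component of the 4-tuple
theorem pv_foldl_comp1 {α : Type} (l : List α) (f : α → Int) (L R S P : Int) :
    l.foldl (fun (a : Int × Int × Int × Int) x => (a.1 + f x, a.2.1, a.2.2.1, a.2.2.2)) (L, R, S, P)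
      = (L + (l.map f).sum, R, S, P) := by
  induction l generalizing L with
  | nil => simp
  | cons hd tl ih => simp [ih, add_assoc]

theorem pv_foldl_comp2 {α : Type} (l : List α) (f : α → Int) (L R S P : Int) :
    l.foldl (fun (a : Int × Int × Int × Int) x => (a.1, a.2.1 + f x, a.2.2.1, a.2.2.2)) (L, R, S, P)
      = (L, R + (l.map f).sum, S, P) := by
  induction l generalizing R with
  | nil => simp
  | cons hd tl ih => simp [ih, add_assoc]

theorem pv_foldl_comp3 {α : Type} (l : List α) (f : α → Int) (L R S P : Int) :
    l.foldl (fun (a : Int × Int × Int × Int) x => (a.1, a.2.1, a.2.2.1 + f x, a.2.2.2)) (L, R, S, P)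
      = (L, R, S + (l.map f).sum, P) := by
  induction l generalizing S with
  | nil => simp
  | cons hd tl ih => simp [ih, add_assoc]

theorem pv_foldl_comp4 {α : Type} (l : List α) (f : α → Int) (L R S P : Int) :
    l.foldl (fun (a : Int × Int × Int × Int) x => (a.1, a.2.1, a.2.2.1, a.2.2.2 + f x)) (L, R, S, P)
      = (L, R, S, P + (l.map f).sum) := by
  induction l generalizing P with
  | nil => simp
  | cons hd tl ih => simp [ih, add_assoc]

-- A's inner key loop adds the dict's value sum to the component chosen by pvTag
theorem pv_stepA_tag (i : List (String × Int)) (h : (i.map Prod.fst).Nodup)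
    (a : Int × Int × Int × Int) :
    pvStepA i a =
      (if pvTag i = 0 then (a.1 + (i.map Prod.snd).sum, a.2.1, a.2.2.1, a.2.2.2)
       else if pvTag i = 1 then (a.1, a.2.1 + (i.map Prod.snd).sum, a.2.2.1, a.2.2.2)
       else if pvTag i = 2 then (a.1, a.2.1, a.2.2.1 + (i.map Prod.snd).sum, a.2.2.2)
       else if pvTag i = 3 then (a.1, a.2.1, a.2.2.1, a.2.2.2 + (i.map Prod.snd).sum)
       else a) := by
  obtain ⟨L, R, S, P⟩ := a
  rw [pvTag_eq]
  by_cases h1 : (i.map Prod.fst).contains "location"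
  · simp only [pvStepA, h1, if_true]
    rw [pv_foldl_comp1 i (fun kv => (i.lookup kv.1).getD 0) L R S P, pv_sum_lookup h]
  · by_cases h2 : (i.map Prod.fst).contains "rooms"
    · simp only [pvStepA, h1, h2, Bool.false_eq_true, if_true, if_false]
      rw [pv_foldl_comp2 i (fun kv => (i.lookup kv.1).getD 0) L R S P, pv_sum_lookup h]
      norm_num
    · by_cases h3 : (i.map Prod.fst).contains "service"
      · simp only [pvStepA, h1, h2, h3, Bool.false_eq_true, if_true, if_false]
        rw [pv_foldl_comp3 i (fun kv => (i.lookup kv.1).getD 0) L R S P, pv_sum_lookup h]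
        norm_num
      · by_cases h4 : (i.map Prod.fst).contains "value"
        · simp only [pvStepA, h1, h2, h3, h4, Bool.false_eq_true, if_true, if_false]
          rw [pv_foldl_comp4 i (fun kv => (i.lookup kv.1).getD 0) L R S P, pv_sum_lookup h]
          norm_num
        · simp only [pvStepA, h1, h2, h3, h4, Bool.false_eq_true, if_false]
          exact (List.foldl_fixed' (fun a => rfl) i).trans (by norm_num)

-- A's fold equals the four per-aspect filtered sums
theorem pv_fold_eq (pol : List (List (String × Int)))
    (hpre : ∀ i ∈ pol, (i.map Prod.fst).Nodup) (L R S P : Int) :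
    pol.foldl (fun a i => pvStepA i a) (L, R, S, P)
      = (L + pvAspSum 0 pol, R + pvAspSum 1 pol, S + pvAspSum 2 pol, P + pvAspSum 3 pol) := by
  induction pol generalizing L R S P with
  | nil => simp [pvAspSum]
  | cons hd tl ih =>
    have hhd := hpre hd (List.mem_cons_self ..)
    have htl : ∀ i ∈ tl, (i.map Prod.fst).Nodup := fun i hi => hpre i (List.mem_cons_of_mem _ hi)
    simp only [List.foldl_cons, pv_stepA_tag hd hhd]
    have hs : ∀ j : Int, pvAspSum j (hd :: tl)
        = (if pvTag hd == j then (hd.map Prod.snd).sum else 0) + pvAspSum j tl := by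
      intro j
      by_cases h : pvTag hd == j <;> simp [pvAspSum, h]
    by_cases t0 : pvTag hd = 0
    · rw [if_pos t0, ih htl]; simp [hs, beq_iff_eq, t0, add_assoc]
    · by_cases t1 : pvTag hd = 1
      · rw [if_neg t0, if_pos t1, ih htl]; simp [hs, beq_iff_eq, t0, t1, add_assoc]
      · by_cases t2 : pvTag hd = 2
        · rw [if_neg t0, if_neg t1, if_pos t2, ih htl]
          simp [hs, beq_iff_eq, t0, t1, t2, add_assoc]
        · by_cases t3 : pvTag hd = 3
          · rw [if_neg t0, if_neg t1, if_neg t2, if_pos t3, ih htl]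
            simp [hs, beq_iff_eq, t0, t1, t2, t3, add_assoc]
          · rw [if_neg t0, if_neg t1, if_neg t2, if_neg t3, ih htl]
            simp [hs, beq_iff_eq, t0, t1, t2, t3]

-- ===== VERDICT (by name: the statement is the Claim_ definition above) =====
theorem FixSingleAspect_spec : Claim_equal_FixSingleAspect := by
  intro pol _ hpre
  unfold Spec_FixSingleAspect FixSingleAspect FixSingleAspect_alt
  rw [pv_fold_eq pol hpre 0 0 0 0]
  simp [List.zipIdx, pvAspSum]
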